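-- pv_equiv track=rewrite | github.com/linclelinkpart5/cheffu-py | cheffu/slot_filter.py | pretty_string
-- ===== SOURCE A (Python) =====
-- import typing
--
-- SlotFilter = typing.NewType('SlotFilter', int)
--
-- SlotIndex = typing.NewType('SlotIndex', int)
--
-- ALL_ZERO = SlotFilter(0)
--
-- ALL_ONES = SlotFilter(-1)
--
-- BLOCK_ALL = ALL_ZERO
--
-- ALLOW_ALL = ALL_ONES
--
-- def is_white_list(slot_filter: SlotFilter) -> bool:
--     return slot_filter >= 0
--
-- def _yield_bits(slot_filter: SlotFilter, stop_bit: bool) -> typing.Iterator[typing.Tuple[SlotIndex, bool]]: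
--     count = SlotIndex(0)
--     mask = 0b1
--     stop_val = ALL_ONES if stop_bit else ALL_ZERO
--     while slot_filter != stop_val:
--         bit = slot_filter & mask
--         yield count, bool(bit)
--         count += 1
--         slot_filter >>= 1
--
-- def allowed_slots(slot_filter: SlotFilter) -> typing.Iterator[SlotIndex]:
--     flag = True
--     yield from (count for count, is_set in _yield_bits(slot_filter, not flag) if is_set == flag)
--
-- def blocked_slots(slot_filter: SlotFilter) -> typing.Iterator[SlotIndex]:
--     flag = False
--     yield from (count for count, is_set in _yield_bits(slot_filter, not flag) if is_set == flag)
--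
-- def pretty_string(slot_filter: SlotFilter) -> str:
--     if slot_filter == ALLOW_ALL:
--         return 'any'
--     elif slot_filter == BLOCK_ALL:
--         return 'none'
--     else:
--         is_white = is_white_list(slot_filter)
--         slots = allowed_slots(slot_filter) if is_white else blocked_slots(slot_filter)
--
--         slots_str = ', '.join(str(s) for s in slots)
--
--         template = '{}' if is_white else '~({})'
--
--         return template.format(slots_str)
-- ===== SOURCE B (Python) =====
-- def pretty_string(slot_filter):
--     if slot_filter == -1:
--         return 'any'
--     if slot_filter == 0:
--         return 'none'
--     is_white = slot_filter >= 0
--     m = slot_filter if is_white else ~slot_filter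
--     parts = []
--     while m:
--         rest = m & (m - 1)          # clear the lowest set bit
--         parts.append(str((m - rest).bit_length() - 1))
--         m = rest
--     s = ', '.join(parts)
--     return s if is_white else '~({})'.format(s)
-- ===== Notes on version B (the rewrite author's own statement) =====
-- stated objective: alternative
-- what changed: Instead of scanning every bit position with a shift-by-one loop (dual stop-values -1/0 and filtered generators), B peels one isolated lowest set bit per iteration of the non-negative magnitude m (m if >= 0 else ~m) via rest = m & (m-1), reading each index off as (m - rest).bit_length() - 1, so the loop runs once per SET bit rather than once per bit position.
import Mathlib
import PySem

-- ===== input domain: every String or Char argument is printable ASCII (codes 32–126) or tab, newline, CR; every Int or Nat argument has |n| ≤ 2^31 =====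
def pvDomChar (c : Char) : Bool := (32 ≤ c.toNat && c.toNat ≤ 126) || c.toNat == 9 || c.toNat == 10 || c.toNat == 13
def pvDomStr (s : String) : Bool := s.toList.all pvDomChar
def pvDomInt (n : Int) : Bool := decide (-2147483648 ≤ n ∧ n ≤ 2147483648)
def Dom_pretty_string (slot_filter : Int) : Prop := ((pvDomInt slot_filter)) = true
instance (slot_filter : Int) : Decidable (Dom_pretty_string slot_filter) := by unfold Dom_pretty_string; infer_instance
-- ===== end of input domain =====

-- B replaces A's per-bit-position scan by peeling one isolated lowest set bit per iteration (m & (m-1)); alternative algorithm, return value only.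

-- ===== PORT A =====
-- allowed_slots(sf): _yield_bits(sf, stop_bit=False) (loop `while sf != 0`) filtered to set bits,
-- paired with its running count.  `fuel` is only a termination bound (the loop halves sf, so it
-- runs bitLength sf times); the `sf ≤ 0` branch is the loop's stop test `sf == 0` made total
-- (Python only reaches this generator with sf > 0).
def allowedSlotsGo (fuel : Nat) (sf : Int) (count : Int) : List Int :=
  match fuel with
  | 0 => []
  | fuel + 1 =>
    if sf ≤ 0 then []
    else (if PySem.Int.band sf 1 ≠ 0 then [count] else []) ++
         allowedSlotsGo fuel (PySem.Int.floordiv sf 2) (count + 1)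

def allowedSlotsAux (sf : Int) (count : Int) : List Int :=
  allowedSlotsGo (PySem.Int.bitLength sf) sf count

-- blocked_slots(sf): _yield_bits(sf, stop_bit=True) (loop `while sf != -1`) filtered to zero bits.
-- `fuel` is again only a termination bound; the `-1 ≤ sf` branch is the stop test made total
-- (Python only reaches this generator with sf < 0, where the loop runs at most bitLength sf times).
def blockedSlotsGo (fuel : Nat) (sf : Int) (count : Int) : List Int :=
  match fuel with
  | 0 => []
  | fuel + 1 =>
    if -1 ≤ sf then []
    else (if PySem.Int.band sf 1 = 0 then [count] else []) ++
         blockedSlotsGo fuel (PySem.Int.floordiv sf 2) (count + 1)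

def blockedSlotsAux (sf : Int) (count : Int) : List Int :=
  blockedSlotsGo (PySem.Int.bitLength sf) sf count

def pretty_string (slot_filter : Int) : String :=
  if slot_filter = -1 then "any"
  else if slot_filter = 0 then "none"
  else
    let is_white := decide (0 ≤ slot_filter)
    let slots := if is_white then allowedSlotsAux slot_filter 0 else blockedSlotsAux slot_filter 0
    let slots_str := PySem.Str.join ", " (slots.map PySem.Int.toStr)
    if is_white then slots_str else "~(" ++ slots_str ++ ")"    -- '~({})'.format(s)

-- ===== PORT B =====
-- the while-loop `while m: rest = m & (m-1); parts.append(str((m-rest).bit_length()-1)); m = rest`;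
-- `fuel` is only a termination bound (m strictly decreases, so m.toNat iterations suffice);
-- the `m = 0` branch is the loop test `while m` made total.
def lsbGo (fuel : Nat) (m : Int) : List String :=
  match fuel with
  | 0 => []
  | fuel + 1 =>
    if m = 0 then []
    else
      let rest := PySem.Int.band m (m - 1)
      PySem.Int.toStr ((PySem.Int.bitLength (m - rest) : Int) - 1) :: lsbGo fuel rest

def pretty_string_alt (slot_filter : Int) : String :=
  if slot_filter = -1 then "any"
  else if slot_filter = 0 then "none"
  else
    let is_white := decide (0 ≤ slot_filter)
    let m : Int := if is_white then slot_filter else Int.not slot_filter   -- ~slot_filter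
    let parts := lsbGo m.toNat m
    let s := PySem.Str.join ", " parts
    if is_white then s else "~(" ++ s ++ ")"

-- ===== PRECONDITION & SPEC =====
def Spec_pretty_string (slot_filter : Int) (out : String) : Prop := out = pretty_string_alt slot_filter
instance (slot_filter : Int) (out : String) : Decidable (Spec_pretty_string slot_filter out) := by unfold Spec_pretty_string; infer_instance

-- ===== CLAIM (what is proved, stated in full; the proofs are below) =====
def Claim_equal_pretty_string : Prop := ∀ (slot_filter : Int), Dom_pretty_string slot_filter → Spec_pretty_string slot_filter (pretty_string slot_filter)

-- ===== LEMMAS AND PROOFS =====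

-- the ascending set-bit-index list both programs produce, as a reference spec
def setBits (n : Nat) : List Nat :=
  (List.range (PySem.Int.bitLength (n : Int))).filter (fun k => (n >>> k) % 2 == 1)

-- bitLength is monotone on adjacent naturals
theorem bl_le_bl_succ : ∀ n : Nat, PySem.Int.bitLength (n : Int) ≤ PySem.Int.bitLength ((n + 1 : Nat) : Int) := by
  intro n
  induction n using Nat.strong_induction_on with
  | _ n ih =>
    by_cases h0 : n = 0
    · subst h0
      simp [PySem.Int.bitLength_zero]
    · have hn0 : 0 < n := Nat.pos_of_ne_zero h0
      rw [PySem.Int.bitLength_natCast hn0, PySem.Int.bitLength_natCast (by omega : 0 < n + 1)]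
      rcases (by omega : (n + 1) / 2 = n / 2 ∨ (n + 1) / 2 = n / 2 + 1) with h | h
      · rw [h]
      · rw [h]
        exact Nat.add_le_add_right (ih (n / 2) (by omega)) 1

-- A's whitelist scan of a non-negative value (any sufficient fuel) equals the set-bit indices
-- of its bit-length range, shifted by the start count.
theorem allowedGo_eq_filter : ∀ (fuel n : Nat) (c : Int), PySem.Int.bitLength (n : Int) ≤ fuel →
    allowedSlotsGo fuel (n : Int) c = (setBits n).map (fun k : Nat => ((k : Int) + c)) := by
  intro fuel
  induction fuel with
  | zero =>
    intro n c hf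
    have h0 : PySem.Int.bitLength ((n : Nat) : Int) = 0 := Nat.le_zero.mp hf
    simp [allowedSlotsGo, setBits, h0]
  | succ fuel ihf =>
    intro n c hf
    by_cases h0 : n = 0
    · subst h0
      simp [allowedSlotsGo, setBits, PySem.Int.bitLength_zero]
    · have hn0 : 0 < n := Nat.pos_of_ne_zero h0
      have hne : ¬ ((n : Int) ≤ 0) := by exact_mod_cast Nat.not_le.mpr hn0
      have hfd : PySem.Int.floordiv (n : Int) 2 = ((n / 2 : Nat) : Int) := by
        exact_mod_cast PySem.Int.floordiv_natCast n 2
      have hbl : PySem.Int.bitLength (n : Int) = PySem.Int.bitLength ((n / 2 : Nat) : Int) + 1 :=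
        PySem.Int.bitLength_natCast hn0
      rw [allowedSlotsGo, if_neg hne, hfd, ihf (n / 2) (c + 1) (by omega)]
      unfold setBits
      rw [hbl, List.range_succ_eq_map, List.filter_cons]
      have hsucc : ∀ k : Nat, n >>> (Nat.succ k) = (n / 2) >>> k := by
        intro k
        rw [show Nat.succ k = 1 + k from by omega, Nat.shiftRight_add, Nat.shiftRight_one]
      have htail : (List.filter (fun k => (n >>> k) % 2 == 1)
            (List.map Nat.succ (List.range (PySem.Int.bitLength ((n / 2 : Nat) : Int)))))
          = (List.filter (fun k => ((n / 2) >>> k) % 2 == 1)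
            (List.range (PySem.Int.bitLength ((n / 2 : Nat) : Int)))).map Nat.succ := by
        rw [List.filter_map]
        congr 1
        apply List.filter_congr
        intro k _
        simp only [Function.comp_apply, hsucc]
      have hmapsucc : ∀ l : List Nat,
          (l.map Nat.succ).map (fun k : Nat => ((k : Int) + c)) = l.map (fun k : Nat => ((k : Int) + (c + 1))) := by
        intro l
        rw [List.map_map]
        apply List.map_congr_left
        intro k _
        simp only [Function.comp_apply, Nat.succ_eq_add_one]
        push_cast
        ring
      have hband : PySem.Int.band (n : Int) 1 = ((n % 2 : Nat) : Int) := by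
        rw [show (1 : Int) = ((1 : Nat) : Int) from rfl, PySem.Int.band_natCast, Nat.and_one_is_mod]
      have hhead : ((n >>> 0) % 2 == 1) = decide (PySem.Int.band (n : Int) 1 ≠ 0) := by
        rw [hband, Nat.shiftRight_zero]
        rcases Nat.mod_two_eq_zero_or_one n with h | h <;> simp [h]
      by_cases hb : PySem.Int.band (n : Int) 1 ≠ 0
      · rw [if_pos hb]
        rw [show ((n >>> 0) % 2 == 1) = true from by rw [hhead]; simp [hb]]
        simp only [if_true]
        rw [List.map_cons, htail, hmapsucc]
        simp
      · rw [if_neg hb]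
        rw [show ((n >>> 0) % 2 == 1) = false from by rw [hhead]; simp at hb ⊢; omega]
        simp only [Bool.false_eq_true, if_false]
        rw [htail, hmapsucc]
        simp

-- A's blacklist scan of sf ≤ -1 equals its whitelist scan of ~sf = -sf-1 at the same fuel
-- (the blocked bits of sf are the set bits of ~sf).
theorem blockedGo_eq_allowedGo : ∀ (fuel : Nat) (sf c : Int), sf ≤ -1 →
    blockedSlotsGo fuel sf c = allowedSlotsGo fuel (-sf - 1) c := by
  intro fuel
  induction fuel with
  | zero =>
    intro sf c hle
    simp [blockedSlotsGo, allowedSlotsGo]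
  | succ fuel ihf =>
    intro sf c hle
    by_cases h1 : sf = -1
    · subst h1
      rw [blockedSlotsGo, allowedSlotsGo]
      norm_num
    · have h2 : sf ≤ -2 := by omega
      have hd2 : PySem.Int.floordiv sf 2 = sf / 2 := PySem.Int.floordiv_eq_ediv_of_pos (by omega)
      have hd2' : PySem.Int.floordiv (-sf - 1) 2 = (-sf - 1) / 2 := PySem.Int.floordiv_eq_ediv_of_pos (by omega)
      have hfd : PySem.Int.floordiv (-sf - 1) 2 = -(PySem.Int.floordiv sf 2) - 1 := by
        rw [hd2, hd2']; omega
      have hmod : (PySem.Int.band (-sf - 1) 1 ≠ 0) ↔ (PySem.Int.band sf 1 = 0) := by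
        rw [PySem.Int.band_one, PySem.Int.band_one,
            PySem.Int.mod_eq_emod_of_pos (by omega), PySem.Int.mod_eq_emod_of_pos (by omega)]
        omega
      rw [blockedSlotsGo, if_neg (by omega : ¬ (-1 ≤ sf)),
          allowedSlotsGo, if_neg (by omega : ¬ (-sf - 1 ≤ 0)), hfd]
      rw [ihf (PySem.Int.floordiv sf 2) (c + 1) (by rw [hd2]; omega)]
      by_cases hb : PySem.Int.band sf 1 = 0
      · rw [if_pos hb, if_pos (hmod.mpr hb)]
      · rw [if_neg hb, if_neg (fun h => hb (hmod.mp h))]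

-- recursion of the reference spec on the low bit
theorem setBits_rec (n : Nat) (hn : 0 < n) :
    setBits n = (if n % 2 == 1 then [0] else []) ++ (setBits (n / 2)).map Nat.succ := by
  unfold setBits
  rw [PySem.Int.bitLength_natCast hn, List.range_succ_eq_map, List.filter_cons]
  have hsucc : ∀ k : Nat, n >>> (Nat.succ k) = (n / 2) >>> k := by
    intro k
    rw [show Nat.succ k = 1 + k from by omega, Nat.shiftRight_add, Nat.shiftRight_one]
  have htail : (List.filter (fun k => (n >>> k) % 2 == 1)
        (List.map Nat.succ (List.range (PySem.Int.bitLength ((n / 2 : Nat) : Int)))))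
      = (List.filter (fun k => ((n / 2) >>> k) % 2 == 1)
        (List.range (PySem.Int.bitLength ((n / 2 : Nat) : Int)))).map Nat.succ := by
    rw [List.filter_map]
    congr 1
    apply List.filter_congr
    intro k _
    simp only [Function.comp_apply, hsucc]
  rw [htail]
  rcases Nat.mod_two_eq_zero_or_one n with h | h <;> simp [h]

-- n odd: clearing the low set bit is just n - 1
theorem and_pred_odd (n : Nat) (h : n % 2 = 1) : n &&& (n - 1) = n - 1 := by
  apply Nat.eq_of_testBit_eq
  intro i
  rw [Nat.testBit_and]
  cases i with
  | zero =>
    have : (n - 1) % 2 = 0 := by omega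
    simp [Nat.testBit_zero, this]
  | succ i =>
    rw [Nat.testBit_add_one, Nat.testBit_add_one,
        show (n - 1) / 2 = n / 2 from by omega]
    cases Nat.testBit (n / 2) i <;> simp

-- n even: clearing the low set bit commutes with halving
theorem and_pred_even (m : Nat) (hm : 0 < m) : (2 * m) &&& (2 * m - 1) = 2 * (m &&& (m - 1)) := by
  apply Nat.eq_of_testBit_eq
  intro i
  rw [Nat.testBit_and]
  cases i with
  | zero =>
    simp [Nat.testBit_zero, Nat.mul_mod_right]
  | succ i =>
    rw [Nat.testBit_add_one, Nat.testBit_add_one, Nat.testBit_add_one,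
        show 2 * m / 2 = m from by omega, show (2 * m - 1) / 2 = m - 1 from by omega,
        show 2 * (m &&& (m - 1)) / 2 = m &&& (m - 1) from by omega, Nat.testBit_and]

theorem and_pred_lt : ∀ n : Nat, 0 < n → n &&& (n - 1) < n := by
  intro n
  induction n using Nat.strong_induction_on with
  | _ n ih =>
    intro hn
    rcases Nat.mod_two_eq_zero_or_one n with h | h
    · obtain ⟨m, hm⟩ : ∃ m, n = 2 * m := ⟨n / 2, by omega⟩
      subst hm
      rw [and_pred_even m (by omega)]
      have := ih m (by omega) (by omega)
      omega
    · rw [and_pred_odd n h]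
      omega

-- peeling the lowest set bit off the reference spec
theorem setBits_peel : ∀ n : Nat, 0 < n →
    setBits n = (PySem.Int.bitLength ((n - (n &&& (n - 1)) : Nat) : Int) - 1) :: setBits (n &&& (n - 1)) := by
  intro n
  induction n using Nat.strong_induction_on with
  | _ n ih =>
    intro hn
    rcases Nat.mod_two_eq_zero_or_one n with h | h
    · -- even: n = 2m
      obtain ⟨m, hm⟩ : ∃ m, n = 2 * m := ⟨n / 2, by omega⟩
      subst hm
      have hm0 : 0 < m := by omega
      have hae := and_pred_even m hm0
      have hrlt : m &&& (m - 1) < m := and_pred_lt m hm0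
      have hlow : 2 * m - ((2 * m) &&& (2 * m - 1)) = 2 * (m - (m &&& (m - 1))) := by
        rw [hae]; omega
      have hbl2 : ∀ x : Nat, 0 < x →
          PySem.Int.bitLength ((2 * x : Nat) : Int) = PySem.Int.bitLength ((x : Nat) : Int) + 1 := by
        intro x hx
        rw [PySem.Int.bitLength_natCast (by omega : 0 < 2 * x), show 2 * x / 2 = x from by omega]
      have hblpos : 0 < PySem.Int.bitLength ((m - (m &&& (m - 1)) : Nat) : Int) := by
        rw [PySem.Int.bitLength_natCast (by omega : 0 < m - (m &&& (m - 1)))]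
        omega
      rw [setBits_rec (2 * m) (by omega), show (2 * m % 2 == 1) = false from by simp [Nat.mul_mod_right],
          show 2 * m / 2 = m from by omega, ih m (by omega) hm0]
      rw [hlow, hbl2 (m - (m &&& (m - 1))) (by omega), hae]
      cases hr0 : m &&& (m - 1) with
      | zero =>
        rw [hr0] at hblpos
        simp only [Nat.sub_zero] at hblpos
        simp only [Nat.mul_zero, List.map_cons, Bool.false_eq_true, if_false, List.nil_append,
          show setBits 0 = [] from by simp [setBits, PySem.Int.bitLength_zero]]
        simp
        omega
      | succ r =>
        rw [setBits_rec (2 * (r + 1)) (by omega), show (2 * (r + 1) % 2 == 1) = false from by simp [Nat.mul_mod_right],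
            show 2 * (r + 1) / 2 = r + 1 from by omega]
        rw [hr0] at hblpos
        simp only [List.map_cons, Bool.false_eq_true, if_false, List.nil_append]
        congr 1
        omega
    · -- odd
      have hao := and_pred_odd n h
      have hlow : n - (n &&& (n - 1)) = 1 := by rw [hao]; omega
      rw [hlow, show PySem.Int.bitLength ((1 : Nat) : Int) = 1 from by decide, hao]
      rw [setBits_rec n hn, show (n % 2 == 1) = true from by simp [h]]
      by_cases h1 : n = 1
      · subst h1
        simp [setBits, PySem.Int.bitLength_zero]
      · rw [setBits_rec (n - 1) (by omega),
            show ((n - 1) % 2 == 1) = false from by simp; omega,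
            show (n - 1) / 2 = n / 2 from by omega]
        simp

-- B's loop over a non-negative value computes the stringified reference spec
theorem lsbGo_eq : ∀ (fuel n : Nat), n ≤ fuel →
    lsbGo fuel (n : Int) = (setBits n).map (fun k : Nat => PySem.Int.toStr (k : Int)) := by
  intro fuel
  induction fuel with
  | zero =>
    intro n hf
    rw [Nat.le_zero.mp hf]
    simp [lsbGo, setBits, PySem.Int.bitLength_zero]
  | succ fuel ihf =>
    intro n hf
    by_cases h0 : n = 0
    · subst h0
      simp [lsbGo, setBits, PySem.Int.bitLength_zero]
    · have hn0 : 0 < n := Nat.pos_of_ne_zero h0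
      have hrlt : n &&& (n - 1) < n := and_pred_lt n hn0
      have hcast1 : (n : Int) - 1 = ((n - 1 : Nat) : Int) := by omega
      have hband : PySem.Int.band (n : Int) ((n : Int) - 1) = ((n &&& (n - 1) : Nat) : Int) := by
        rw [hcast1, PySem.Int.band_natCast]
      have hlowc : (n : Int) - ((n &&& (n - 1) : Nat) : Int) = ((n - (n &&& (n - 1)) : Nat) : Int) := by
        omega
      have hblpos : 0 < PySem.Int.bitLength ((n - (n &&& (n - 1)) : Nat) : Int) := by
        rw [PySem.Int.bitLength_natCast (by omega : 0 < n - (n &&& (n - 1)))]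
        omega
      rw [lsbGo, if_neg (by exact_mod_cast h0)]
      simp only [hband, hlowc]
      rw [ihf (n &&& (n - 1)) (by omega)]
      rw [setBits_peel n hn0, List.map_cons]
      congr 2
      omega

-- A stringifies its Int index list (with +0 start count) to the same strings as B's spec map
theorem map_toStr (l : List Nat) :
    (l.map (fun k : Nat => ((k : Int) + 0))).map PySem.Int.toStr
      = l.map (fun k : Nat => PySem.Int.toStr (k : Int)) := by
  rw [List.map_map]
  apply List.map_congr_left
  intro k _
  simp

-- ===== VERDICT (by name: the statement is the Claim_ definition above) =====
theorem pretty_string_spec : Claim_equal_pretty_string := by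
  intro sf _
  show pretty_string sf = pretty_string_alt sf
  unfold pretty_string pretty_string_alt
  by_cases h1 : sf = -1
  · simp [h1]
  by_cases h2 : sf = 0
  · simp [h2]
  rw [if_neg h1, if_neg h2, if_neg h1, if_neg h2]
  by_cases hw : 0 ≤ sf
  · simp only [hw, decide_true, if_true]
    have hn : sf = ((sf.toNat : Nat) : Int) := (Int.toNat_of_nonneg hw).symm
    rw [hn]
    unfold allowedSlotsAux
    rw [allowedGo_eq_filter (PySem.Int.bitLength ((sf.toNat : Nat) : Int)) sf.toNat 0 le_rfl]
    rw [show ((sf.toNat : Nat) : Int).toNat = sf.toNat from by omega]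
    rw [lsbGo_eq sf.toNat sf.toNat le_rfl, map_toStr]
  · simp only [hw, decide_false, Bool.false_eq_true, if_false]
    have hle : sf ≤ -1 := by omega
    have hnot : Int.not sf = -sf - 1 := by
      cases sf <;> simp [Int.not, Int.negSucc_eq] <;> omega
    unfold blockedSlotsAux
    rw [blockedGo_eq_allowedGo (PySem.Int.bitLength sf) sf 0 hle, hnot]
    have hn : (-sf - 1) = (((-sf - 1).toNat : Nat) : Int) := (Int.toNat_of_nonneg (by omega)).symm
    have hblle : PySem.Int.bitLength ((((-sf - 1).toNat : Nat) : Int)) ≤ PySem.Int.bitLength sf := by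
      have habs : PySem.Int.bitLength sf = PySem.Int.bitLength (((sf.natAbs : Nat) : Int)) := by
        rw [show ((sf.natAbs : Nat) : Int) = -sf from by omega, PySem.Int.bitLength_neg]
      rw [habs, show (sf.natAbs : Nat) = (-sf - 1).toNat + 1 from by omega]
      exact bl_le_bl_succ ((-sf - 1).toNat)
    rw [hn, allowedGo_eq_filter (PySem.Int.bitLength sf) ((-sf - 1).toNat) 0 hblle]
    rw [show ((((-sf - 1).toNat : Nat) : Int)).toNat = (-sf - 1).toNat from by omega]
    rw [lsbGo_eq ((-sf - 1).toNat) ((-sf - 1).toNat) le_rfl, map_toStr]
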